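-- pv_equiv track=rewrite | github.com/ktsujimoto0624-cmd/mahjong-ai | mahjong/engine/agari.py | _check_seven_pairs
-- ===== SOURCE A (Python) =====
-- def _check_seven_pairs(hand):
--     """七対子の判定: 7種類の牌がちょうど2枚ずつ"""
--     pairs = 0
--     for count in hand:
--         if count == 2:
--             pairs += 1
--         elif count != 0:
--             return False
--     return pairs == 7
-- ===== SOURCE B (Python) =====
-- def _check_seven_pairs(hand):
--     """Seven pairs check by sort-then-pattern-compare instead of a counting loop."""
--     return sorted(hand) == [0] * (len(hand) - 7) + [2] * 7
-- ===== Notes on version B (the rewrite author's own statement) =====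
-- stated objective: alternative
-- what changed: Replaced the early-exit counting loop (count pairs of 2, bail on any other nonzero) by sorting the count vector and comparing it structurally against the canonical seven-pairs pattern of zeros followed by seven twos.
import Mathlib
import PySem

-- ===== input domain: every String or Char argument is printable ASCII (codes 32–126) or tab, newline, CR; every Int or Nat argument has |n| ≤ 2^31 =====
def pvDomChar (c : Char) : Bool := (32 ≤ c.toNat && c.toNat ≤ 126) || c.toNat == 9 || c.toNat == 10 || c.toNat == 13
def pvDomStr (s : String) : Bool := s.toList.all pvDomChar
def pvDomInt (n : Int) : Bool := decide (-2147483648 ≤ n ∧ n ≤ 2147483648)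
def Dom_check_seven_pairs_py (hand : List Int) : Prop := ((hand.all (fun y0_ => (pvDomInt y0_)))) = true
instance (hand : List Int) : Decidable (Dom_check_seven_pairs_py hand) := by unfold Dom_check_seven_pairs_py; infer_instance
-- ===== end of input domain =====

-- B replaces A's early-exit counting loop by sort-then-compare against the canonical
-- seven-pairs pattern of zeros followed by seven twos (alternative decomposition, same cost class).


-- ===== PORT A =====
-- A's for-loop with early return, as structural recursion over the remaining hand
-- carrying the `pairs` accumulator.
def checkSevenPairsLoop : List Int → Int → Bool
  | [], pairs => pairs == 7
  | count :: rest, pairs =>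
      if count == 2 then checkSevenPairsLoop rest (pairs + 1)
      else if count != 0 then false
      else checkSevenPairsLoop rest pairs

def check_seven_pairs_py (hand : List Int) : Bool := checkSevenPairsLoop hand 0

-- ===== PORT B =====
-- sorted(hand) compared to the pattern of zeros then seven twos; Python's list repetition is empty for k ≤ 0,
-- which Nat subtraction hand.length - 7 reproduces exactly.
def check_seven_pairs_py_alt (hand : List Int) : Bool :=
  PySem.List.sorted hand (fun x => x) false ==
    List.replicate (hand.length - 7) (0 : Int) ++ List.replicate 7 (2 : Int)

-- ===== PRECONDITION & SPEC =====
def Spec_check_seven_pairs_py (hand : List Int) (out : Bool) : Prop := out = check_seven_pairs_py_alt hand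
instance (hand : List Int) (out : Bool) : Decidable (Spec_check_seven_pairs_py hand out) := by unfold Spec_check_seven_pairs_py; infer_instance

-- ===== CLAIM (what is proved, stated in full; the proofs are below) =====
def Claim_equal_check_seven_pairs_py : Prop := ∀ (hand : List Int), Dom_check_seven_pairs_py hand → Spec_check_seven_pairs_py hand (check_seven_pairs_py hand)

-- ===== LEMMAS AND PROOFS =====

-- A's loop computes: all entries are 0 or 2, and the running pairs count ends at 7.
theorem checkSevenPairsLoop_eq (hand : List Int) (p : Int) :
    checkSevenPairsLoop hand p =
      ((hand.all fun c => c == 0 || c == 2) && (p + (hand.count 2 : Int) == 7)) := by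
  induction hand generalizing p with
  | nil => simp [checkSevenPairsLoop]
  | cons c rest ih =>
      by_cases h2 : c = 2
      · subst h2
        simp [checkSevenPairsLoop, ih]
        rw [show p + 1 + (List.count 2 rest : Int) = p + ((List.count 2 rest : Int) + 1) from by ring]
      · by_cases h0 : c = 0
        · subst h0
          simp [checkSevenPairsLoop, ih, List.count_cons]
        · simp [checkSevenPairsLoop, h2, h0, bne, beq_iff_eq]

theorem count_zero_two (hand : List Int) (h : ∀ c ∈ hand, c = 0 ∨ c = 2) :
    hand.count 0 + hand.count 2 = hand.length := by
  induction hand with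
  | nil => simp
  | cons c rest ih =>
      have hc := h c (by simp)
      have hr : ∀ c ∈ rest, c = 0 ∨ c = 2 := fun x hx => h x (by simp [hx])
      have h' := ih hr
      rcases hc with rfl | rfl <;> simp [List.count_cons] <;> omega

-- B's pattern comparison holds exactly on the same property.
theorem alt_iff (hand : List Int) :
    check_seven_pairs_py_alt hand = true ↔
      (∀ c ∈ hand, c = 0 ∨ c = 2) ∧ hand.count 2 = 7 := by
  unfold check_seven_pairs_py_alt
  rw [beq_iff_eq]
  constructor
  · intro h
    have hperm : hand.Perm (List.replicate (hand.length - 7) (0 : Int) ++ List.replicate 7 (2 : Int)) := by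
      have := PySem.List.sorted_perm (xs := hand) (key := fun x => x) (rev := false)
      rw [h] at this
      exact this.symm
    constructor
    · intro c hc
      have := hperm.mem_iff.mp hc
      simp [List.mem_replicate] at this
      tauto
    · have := hperm.count_eq 2
      simpa [List.count_replicate] using this
  · rintro ⟨hmem, hcnt⟩
    have hlen : hand.count 0 + 7 = hand.length := by
      have := count_zero_two hand hmem; omega
    have hperm : (List.replicate (hand.length - 7) (0 : Int) ++ List.replicate 7 (2 : Int)).Perm hand := by
      rw [List.perm_iff_count]
      intro a
      by_cases ha0 : a = 0
      · subst ha0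
        rw [List.count_append, List.count_replicate, List.count_replicate]
        simp; omega
      · by_cases ha2 : a = 2
        · subst ha2
          rw [List.count_append, List.count_replicate, List.count_replicate]
          simp [hcnt]
        · have : a ∉ hand := fun hmem' => by rcases hmem a hmem' with rfl | rfl <;> simp_all
          rw [List.count_append, List.count_replicate, List.count_replicate,
            List.count_eq_zero.mpr this]
          split_ifs <;> simp_all
    have hpw : (List.replicate (hand.length - 7) (0 : Int) ++ List.replicate 7 (2 : Int)).Pairwise (· ≤ ·) := by
      apply List.pairwise_append.mpr
      refine ⟨List.pairwise_replicate.mpr (by simp), List.pairwise_replicate.mpr (by simp), ?_⟩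
      intro a ha b hb
      simp [List.mem_replicate] at ha hb
      omega
    exact PySem.List.sorted_id_eq_of_perm_of_pairwise _ _ hperm hpw

-- ===== VERDICT (by name: the statement is the Claim_ definition above) =====
theorem check_seven_pairs_py_spec : Claim_equal_check_seven_pairs_py := by
  intro hand _
  unfold Spec_check_seven_pairs_py check_seven_pairs_py
  rw [checkSevenPairsLoop_eq]
  rw [Bool.eq_iff_iff]
  rw [alt_iff]
  simp [List.all_eq_true]
  intro _
  omega
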